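-- pv_equiv track=rewrite | github.com/HBinhCT/Q-project | hackerrank/Algorithms/Bricks Game/solution.py | bricksGame
-- ===== SOURCE A (Python) =====
-- def bricksGame(arr):
--     #
--     # Write your code here.
--     #
--     n = len(arr)
--     dp = [0] * (n + 4)
--     s = 0
--     for i in range(n - 1, -1, -1):
--         s += arr[i]
--         dp[i] = s - (min(dp[i + 1], dp[i + 2], dp[i + 3]))
--     return dp[0]
-- ===== SOURCE B (Python) =====
-- def bricksGame(arr):
--     # Top-down memoized recursion over the starting index, with prefix sums
--     # built in a forward pass; a backward warming loop keeps recursion shallow.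
--     n = len(arr)
--     pre = [0]
--     run = 0
--     for x in arr:
--         run += x
--         pre.append(run)
--     total = run
--     memo = {}
--
--     def f(i):
--         if i >= n:
--             return 0
--         if i in memo:
--             return memo[i]
--         v = (total - pre[i]) - min(f(i + 1), f(i + 2), f(i + 3))
--         memo[i] = v
--         return v
--
--     for i in range(n - 1, -1, -1):
--         f(i)
--     return f(0)
-- ===== Notes on version B (the rewrite author's own statement) =====
-- stated objective: alternative
-- what changed: Replaces A's backward in-place dp-array loop with a top-down memoized recursion f(i) = suffix(i) - min(f(i+1),f(i+2),f(i+3)) over precomputed prefix sums (forward prefix pass + dict memo + demand-driven recursion, warmed to keep depth bounded).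
import Mathlib
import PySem

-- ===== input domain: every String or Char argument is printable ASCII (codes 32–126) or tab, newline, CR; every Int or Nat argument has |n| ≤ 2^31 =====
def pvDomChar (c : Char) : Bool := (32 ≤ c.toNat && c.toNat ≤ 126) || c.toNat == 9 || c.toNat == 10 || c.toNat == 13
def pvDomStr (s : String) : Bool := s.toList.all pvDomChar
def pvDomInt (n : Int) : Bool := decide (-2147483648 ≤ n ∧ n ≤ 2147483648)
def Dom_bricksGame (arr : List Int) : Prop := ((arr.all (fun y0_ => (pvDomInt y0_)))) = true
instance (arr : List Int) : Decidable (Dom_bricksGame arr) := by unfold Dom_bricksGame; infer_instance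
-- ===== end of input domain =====

-- A = backward dp array; B = top-down memoized recursion f(i)=suffix(i)-min(f(i+1..i+3)) over prefix sums (different decomposition, same O(n) cost).


-- ===== PORT A =====
-- one iteration of A's 'for i in range(n-1,-1,-1)' body; state = (dp, s).
-- pyGetD/pySetD are used with default 0: every access A makes is in range (0 ≤ i < n ≤ len dp - 3), so they are exact.
def bricksGameStepA (arr : List Int) (st : List Int × Int) (i : Int) : List Int × Int :=
  let s := st.2 + PySem.List.pyGetD arr i 0
  let m := min (PySem.List.pyGetD st.1 (i + 1) 0)
      (min (PySem.List.pyGetD st.1 (i + 2) 0) (PySem.List.pyGetD st.1 (i + 3) 0))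
  (PySem.List.pySetD st.1 i (s - m), s)

def bricksGame (arr : List Int) : Int :=
  let n : Int := arr.length
  let dp : List Int := List.replicate (arr.length + 4) 0
  let res := (PySem.List.pyRange (n - 1) (-1) (-1)).foldl (bricksGameStepA arr) (dp, 0)
  PySem.List.pyGetD res.1 0 0

-- ===== PORT B =====
-- the inner memoized recursion 'f' of Source B; memo is threaded through (Python mutates it in place).
-- pre[i] is accessed only with 0 ≤ i < len(pre), so pyGetD with default 0 is exact.
def bricksGameF (n total : Int) (pre : List Int) (i : Int) (memo : PySem.Dict Int Int) :
    Int × PySem.Dict Int Int :=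
  if _h : n ≤ i then (0, memo)
  else
    match memo.get? i with
    | some v => (v, memo)
    | none =>
      let r1 := bricksGameF n total pre (i + 1) memo
      let r2 := bricksGameF n total pre (i + 2) r1.2
      let r3 := bricksGameF n total pre (i + 3) r2.2
      let v := (total - PySem.List.pyGetD pre i 0) - min r1.1 (min r2.1 r3.1)
      (v, r3.2.insert i v)
termination_by (n - i).toNat
decreasing_by all_goals (simp at _h; omega)

def bricksGame_alt (arr : List Int) : Int :=
  let n : Int := arr.length
  -- prefix-sum pass: pre = [0]; run = 0; for x in arr: run += x; pre.append(run)
  let pr := arr.foldl (fun (st : List Int × Int) x => (st.1 ++ [st.2 + x], st.2 + x)) ([0], 0)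
  let pre := pr.1
  let total := pr.2
  -- warming loop: for i in range(n-1,-1,-1): f(i)
  let memo := (PySem.List.pyRange (n - 1) (-1) (-1)).foldl
    (fun m i => (bricksGameF n total pre i m).2) PySem.Dict.empty
  (bricksGameF n total pre 0 memo).1

-- ===== PRECONDITION & SPEC =====
def Spec_bricksGame (arr : List Int) (out : Int) : Prop := out = bricksGame_alt arr
instance (arr : List Int) (out : Int) : Decidable (Spec_bricksGame arr out) := by unfold Spec_bricksGame; infer_instance

-- ===== CLAIM (what is proved, stated in full; the proofs are below) =====
def Claim_equal_bricksGame : Prop := ∀ (arr : List Int), Dom_bricksGame arr → Spec_bricksGame arr (bricksGame arr)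

-- ===== LEMMAS AND PROOFS =====

-- the mathematical recurrence both programs compute: g j = sum(arr[j:]) - min(g(j+1), g(j+2), g(j+3))
def gS (arr : List Int) (j : Nat) : Int :=
  if _h : j < arr.length then
    (arr.drop j).sum - min (gS arr (j + 1)) (min (gS arr (j + 2)) (gS arr (j + 3)))
  else 0
termination_by arr.length - j

theorem gS_of_ge (arr : List Int) (j : Nat) (h : arr.length ≤ j) : gS arr j = 0 := by
  rw [gS]; simp [Nat.not_lt.mpr h]

theorem gS_of_lt (arr : List Int) (j : Nat) (h : j < arr.length) :
    gS arr j = (arr.drop j).sum - min (gS arr (j + 1)) (min (gS arr (j + 2)) (gS arr (j + 3))) := by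
  rw [gS]; simp [h]

-- ---------- A side ----------

theorem pyRange_neg_one_snoc (a b : Int) (h : b < a) :
    PySem.List.pyRange a b (-1) = PySem.List.pyRange a (b + 1) (-1) ++ [b + 1] := by
  rw [PySem.List.pyRange_neg_one_eq_reverse, PySem.List.pyRange_neg_one_eq_reverse,
    PySem.List.pyRange_one_cons (by omega)]
  simp

theorem getD_set_self (xs : List Int) (i : Nat) (v : Int) (h : i < xs.length) :
    (xs.set i v).getD i 0 = v := by
  simp [List.getD, h]

theorem getD_set_ne (xs : List Int) (i j : Nat) (v : Int) (h : i ≠ j) :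
    (xs.set i v).getD j 0 = xs.getD j 0 := by
  simp [List.getD, h]

theorem drop_sum_cons (arr : List Int) (j : Nat) (h : j < arr.length) :
    (arr.drop j).sum = arr[j] + (arr.drop (j + 1)).sum := by
  rw [List.drop_eq_getElem_cons h]; rfl

-- loop invariant for A: after k steps dp holds g at the three live cells and s is the suffix sum
theorem bricksGame_inv (arr : List Int) (k : Nat) (hk : k ≤ arr.length) :
    let n := arr.length
    let fa := (PySem.List.pyRange ((n : Int) - 1) ((n : Int) - 1 - k) (-1)).foldl
      (bricksGameStepA arr) (List.replicate (n + 4) 0, 0)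
    fa.1.length = n + 4 ∧ fa.2 = (arr.drop (n - k)).sum ∧
      fa.1.getD (n - k) 0 = gS arr (n - k) ∧
      fa.1.getD (n - k + 1) 0 = gS arr (n - k + 1) ∧
      fa.1.getD (n - k + 2) 0 = gS arr (n - k + 2) := by
  intro n
  induction k with
  | zero =>
      rw [PySem.List.pyRange_neg_one_eq_nil (by omega)]
      simp [n, gS_of_ge arr arr.length le_rfl, gS_of_ge arr (arr.length + 1) (by omega),
        gS_of_ge arr (arr.length + 2) (by omega), List.getD]
  | succ k ih =>
      have hkn : k < arr.length := by omega
      have ih' := ih (by omega)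
      have hc1 : (((k + 1 : Nat)) : Int) = (k : Int) + 1 := by push_cast; ring
      have hr : PySem.List.pyRange ((n : Int) - 1) ((n : Int) - 1 - ((k + 1 : Nat) : Int)) (-1)
          = PySem.List.pyRange ((n : Int) - 1) ((n : Int) - 1 - k) (-1) ++ [(n : Int) - 1 - k] := by
        rw [hc1, pyRange_neg_one_snoc ((n : Int) - 1) ((n : Int) - 1 - ((k : Int) + 1)) (by omega)]
        congr 1 <;> [skip; congr 1] <;> ring_nf
      rw [hr, List.foldl_append]
      obtain ⟨hlen, hs, h0, h1, h2⟩ := ih'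
      set A := (PySem.List.pyRange ((n : Int) - 1) ((n : Int) - 1 - k) (-1)).foldl
        (bricksGameStepA arr) (List.replicate (n + 4) 0, 0) with hA
      simp only [List.foldl_cons, List.foldl_nil]
      have hi : ((n : Int) - 1 - k) = ((n - 1 - k : Nat) : Int) := by omega
      have harr : PySem.List.pyGetD arr ((n : Int) - 1 - k) 0 = arr[n - 1 - k]'(by omega) := by
        rw [hi, PySem.List.pyGetD_natCast]
        simp [List.getD, List.getElem?_eq_getElem (show n - 1 - k < arr.length by omega)]
      have e1 : ((n : Int) - 1 - k + 1) = ((n - k : Nat) : Int) := by omega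
      have e2 : ((n : Int) - 1 - k + 2) = ((n - k + 1 : Nat) : Int) := by omega
      have e3 : ((n : Int) - 1 - k + 3) = ((n - k + 2 : Nat) : Int) := by omega
      unfold bricksGameStepA
      rw [harr, e1, e2, e3, PySem.List.pyGetD_natCast, PySem.List.pyGetD_natCast,
        PySem.List.pyGetD_natCast, h0, h1, h2, hs]
      dsimp only
      rw [hi, PySem.List.pySetD_natCast]
      have hsnew : (arr.drop (n - k)).sum + arr[n - 1 - k]'(by omega)
          = (arr.drop (n - (k + 1))).sum := by
        have := drop_sum_cons arr (n - 1 - k) (by omega)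
        rw [show n - (k + 1) = n - 1 - k by omega, this,
          show n - 1 - k + 1 = n - k by omega]; ring
      have hgnew : (arr.drop (n - (k + 1))).sum
          - min (gS arr (n - k)) (min (gS arr (n - k + 1)) (gS arr (n - k + 2)))
          = gS arr (n - (k + 1)) := by
        rw [gS_of_lt arr (n - (k + 1)) (by omega),
          show n - (k + 1) + 1 = n - k by omega,
          show n - (k + 1) + 2 = n - k + 1 by omega,
          show n - (k + 1) + 3 = n - k + 2 by omega]
      refine ⟨by simpa using hlen, by rw [hsnew], ?_, ?_, ?_⟩
      · rw [show n - (k + 1) = n - 1 - k by omega] at hsnew hgnew ⊢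
        rw [getD_set_self _ _ _ (by omega), hsnew, hgnew]
      · rw [show n - (k + 1) + 1 = n - k by omega,
          getD_set_ne _ _ _ _ (by omega), h0]
      · rw [show n - (k + 1) + 2 = n - k + 1 by omega,
          getD_set_ne _ _ _ _ (by omega), h1]

theorem bricksGame_eq_gS (arr : List Int) : bricksGame arr = gS arr 0 := by
  unfold bricksGame
  have h := bricksGame_inv arr arr.length le_rfl
  simp only at h
  obtain ⟨_, _, h0, _, _⟩ := h
  have he : ((arr.length : Int) - 1 - (arr.length : Nat)) = -1 := by ring
  rw [he, Nat.sub_self] at h0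
  simpa only [PySem.List.pyGetD_zero, List.getD] using h0

-- ---------- B side ----------

-- the prefix-sum pass builds exactly the table of partial sums
theorem pre_build (arr : List Int) :
    arr.foldl (fun (st : List Int × Int) x => (st.1 ++ [st.2 + x], st.2 + x)) ([0], 0)
      = ((List.range (arr.length + 1)).map (fun j => (arr.take j).sum), arr.sum) := by
  induction arr using List.reverseRecOn with
  | nil => simp
  | append_singleton xs x ih =>
      rw [List.foldl_append, ih]
      simp only [List.foldl_cons, List.foldl_nil]
      refine Prod.ext ?_ (by simp)
      dsimp only
      · conv_rhs => rw [List.length_append, List.length_singleton,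
          show xs.length + 1 + 1 = (xs.length + 1) + 1 from rfl, List.range_succ, List.map_append]
        congr 1
        · apply List.map_congr_left
          intro j hj
          rw [List.mem_range] at hj
          rw [List.take_append_of_le_length (by omega)]
        · simp

theorem pre_getD (arr : List Int) (j : Nat) (hj : j ≤ arr.length) :
    PySem.List.pyGetD ((List.range (arr.length + 1)).map (fun j => (arr.take j).sum)) (j : Int) 0
      = (arr.take j).sum := by
  rw [PySem.List.pyGetD_natCast]
  simp [List.getD, List.getElem?_map, List.getElem?_range (show j < arr.length + 1 by omega)]

def SoundMemo (arr : List Int) (m : PySem.Dict Int Int) : Prop :=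
  ∀ (j : Nat) (v : Int), m.get? (j : Int) = some v → v = gS arr j

theorem bricksGameF_correct (arr : List Int) (j : Nat) (m : PySem.Dict Int Int)
    (hm : SoundMemo arr m) :
    (bricksGameF (arr.length : Int) arr.sum
        ((List.range (arr.length + 1)).map (fun j => (arr.take j).sum)) (j : Int) m).1
      = gS arr j ∧
    SoundMemo arr (bricksGameF (arr.length : Int) arr.sum
        ((List.range (arr.length + 1)).map (fun j => (arr.take j).sum)) (j : Int) m).2 := by
  by_cases hj : arr.length ≤ j
  · rw [bricksGameF]
    rw [dif_pos (by exact_mod_cast hj)]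
    exact ⟨(gS_of_ge arr j hj).symm, hm⟩
  · rw [Nat.not_le] at hj
    rw [bricksGameF, dif_neg (by exact_mod_cast Nat.not_le.mpr hj)]
    cases hget : m.get? (j : Int) with
    | some v => exact ⟨hm j v hget, hm⟩
    | none =>
        have hc1 : ((j : Int) + 1) = ((j + 1 : Nat) : Int) := by push_cast; ring
        have hc2 : ((j : Int) + 2) = ((j + 2 : Nat) : Int) := by push_cast; ring
        have hc3 : ((j : Int) + 3) = ((j + 3 : Nat) : Int) := by push_cast; ring
        simp only [hc1, hc2, hc3]
        obtain ⟨e1, s1⟩ := bricksGameF_correct arr (j + 1) m hm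
        obtain ⟨e2, s2⟩ := bricksGameF_correct arr (j + 2) _ s1
        obtain ⟨e3, s3⟩ := bricksGameF_correct arr (j + 3) _ s2
        rw [e1, e2, e3]
        have hv : arr.sum - PySem.List.pyGetD
              ((List.range (arr.length + 1)).map (fun j => (arr.take j).sum)) (j : Int) 0
            - min (gS arr (j + 1)) (min (gS arr (j + 2)) (gS arr (j + 3))) = gS arr j := by
          rw [pre_getD arr j (le_of_lt hj), gS_of_lt arr j hj]
          have := List.sum_take_add_sum_drop arr j
          omega
        rw [hv]
        refine ⟨rfl, ?_⟩
        intro k w hk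
        rw [PySem.Dict.get?_insert] at hk
        by_cases hkj : (k : Int) = (j : Int)
        · rw [if_pos hkj] at hk
          have : k = j := by exact_mod_cast hkj
          subst this
          injection hk with hk'
          exact hk'.symm
        · rw [if_neg hkj] at hk
          exact s3 k w hk
termination_by arr.length - j
decreasing_by all_goals omega

-- the warming loop preserves soundness (all its indices are ≥ 0)
theorem warm_sound (arr : List Int) (l : List Int) (hl : ∀ x ∈ l, 0 ≤ x)
    (m : PySem.Dict Int Int) (hm : SoundMemo arr m) :
    SoundMemo arr (l.foldl
      (fun m i => (bricksGameF (arr.length : Int) arr.sum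
        ((List.range (arr.length + 1)).map (fun j => (arr.take j).sum)) i m).2) m) := by
  induction l generalizing m with
  | nil => exact hm
  | cons x xs ih =>
      simp only [List.foldl_cons]
      have hx : 0 ≤ x := hl x List.mem_cons_self
      have hxe : x = ((x.toNat : Nat) : Int) := by omega
      refine ih (fun y hy => hl y (List.mem_cons_of_mem _ hy)) _ ?_
      rw [hxe]
      exact (bricksGameF_correct arr x.toNat m hm).2

theorem bricksGame_alt_eq_gS (arr : List Int) : bricksGame_alt arr = gS arr 0 := by
  unfold bricksGame_alt
  rw [pre_build]
  dsimp only
  have hsound : SoundMemo arr ((PySem.List.pyRange ((arr.length : Int) - 1) (-1) (-1)).foldl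
      (fun m i => (bricksGameF (arr.length : Int) arr.sum
        ((List.range (arr.length + 1)).map (fun j => (arr.take j).sum)) i m).2)
      PySem.Dict.empty) := by
    apply warm_sound
    · intro x hx
      rw [PySem.List.mem_pyRange_neg_one] at hx
      omega
    · intro j v h
      rw [PySem.Dict.get?_empty] at h
      exact absurd h (by simp)
  have := (bricksGameF_correct arr 0 _ hsound).1
  simpa using this

-- ===== VERDICT (by name: the statement is the Claim_ definition above) =====
theorem bricksGame_spec : Claim_equal_bricksGame := by
  intro arr _
  unfold Spec_bricksGame
  rw [bricksGame_eq_gS, bricksGame_alt_eq_gS]
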